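-- pv_equiv track=rewrite | github.com/miguelbper/jane-street-puzzles | 2022-10-the-marshy-mess.py | valid
-- ===== SOURCE A (Python) =====
-- from typing import Optional
--
-- Island = int
--
-- Islands = dict[Island, tuple[int, int, Optional[int]]]
--
-- def valid(islands: Islands, i: Island, j: Island) -> bool:
--     # i < j
--     if i >= j:
--         return False
--
--     # i, j are aligned
--     xi, yi, _ = islands[i]
--     xj, yj, _ = islands[j]
--     if not (xi == xj or yi == yj):
--         return False
--
--     # no island in the middle of i, j
--     xx, XX = min(xi, xj), max(xi, xj)
--     yy, YY = min(yi, yj), max(yi, yj)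
--
--     def obstructs(k):
--         xk, yk, _ = islands[k]
--         midx = (xk == xi and (yy < yk < YY))
--         midy = (yk == yi and (xx < xk < XX))
--         return midx or midy
--
--     others = (k for k in islands.keys() if k != i and k != j)
--
--     return not any(map(obstructs, others))
-- ===== SOURCE B (Python) =====
-- # Same alignment guards; obstruction test re-done as segment enumeration over an occupancy set
-- # of positions, instead of scanning every other island with obstructs().
-- def valid(islands, i, j):
--     if i >= j:
--         return False
--     xi, yi, _ = islands[i]
--     xj, yj, _ = islands[j]
--     if not (xi == xj or yi == yj):
--         return False
--     occupied = {(x, y) for (x, y, _) in islands.values()}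
--     if xi == xj:
--         for y in range(min(yi, yj) + 1, max(yi, yj)):
--             if (xi, y) in occupied:
--                 return False
--     else:
--         for x in range(min(xi, xj) + 1, max(xi, xj)):
--             if (x, yi) in occupied:
--                 return False
--     return True
-- ===== Notes on version B (the rewrite author's own statement) =====
-- stated objective: alternative
-- what changed: Instead of scanning every other island with an obstructs() predicate, B builds a set of occupied positions once and walks the lattice points strictly between the two islands along their shared row/column, failing on the first occupied interior point.
import Mathlib
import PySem

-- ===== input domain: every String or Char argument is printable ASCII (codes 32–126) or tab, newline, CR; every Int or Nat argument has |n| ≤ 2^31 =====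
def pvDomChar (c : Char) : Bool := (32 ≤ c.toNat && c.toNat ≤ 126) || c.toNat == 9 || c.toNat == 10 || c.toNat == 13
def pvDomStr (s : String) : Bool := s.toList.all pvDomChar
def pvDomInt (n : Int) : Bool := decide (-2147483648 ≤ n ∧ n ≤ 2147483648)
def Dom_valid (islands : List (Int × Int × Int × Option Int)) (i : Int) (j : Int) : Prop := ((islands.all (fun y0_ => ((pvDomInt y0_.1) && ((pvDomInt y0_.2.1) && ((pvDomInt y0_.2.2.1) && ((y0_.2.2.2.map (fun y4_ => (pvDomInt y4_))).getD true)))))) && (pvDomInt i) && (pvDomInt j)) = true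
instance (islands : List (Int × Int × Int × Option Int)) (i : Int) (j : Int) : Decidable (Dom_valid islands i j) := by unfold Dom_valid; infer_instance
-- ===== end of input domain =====

-- B replaces A's scan over all other islands with a walk over the lattice points strictly
-- between i and j, tested against a set of occupied positions (objective: alternative).

-- ===== PORT A =====
-- the dict argument, decoded from its association-list representation
def pvDictA (islands : List (Int × Int × Int × Option Int)) : PySem.Dict Int (Int × Int × Option Int) :=
  PySem.Dict.ofList (islands.map (fun e => (e.1, (e.2.1, e.2.2.1, e.2.2.2))))
-- A's inner closure `obstructs`, lifted to a helper (captured variables become parameters)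
def obstructsA (d : PySem.Dict Int (Int × Int × Option Int)) (xi yi xx XX yy YY : Int) (k : Int) : Bool :=
  match d.get? k with
  | some (xk, yk, _) => (xk == xi && (yy < yk && yk < YY)) || (yk == yi && (xx < xk && xk < XX))
  | none => false

def valid (islands : List (Int × Int × Int × Option Int)) (i : Int) (j : Int) : Bool :=
  if i ≥ j then false
  else
    let d := pvDictA islands
    match d.get? i, d.get? j with
    | some (xi, yi, _), some (xj, yj, _) =>
      if !(xi == xj || yi == yj) then false
      else
        !((d.keys.filter (fun k => k != i && k != j)).any
            (obstructsA d xi yi (min xi xj) (max xi xj) (min yi yj) (max yi yj)))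
    | _, _ => false  -- Python raises KeyError here; excluded by Pre_valid

-- ===== PORT B =====
-- the dict argument, decoded from its association-list representation
def pvDictB (islands : List (Int × Int × Int × Option Int)) : PySem.Dict Int (Int × Int × Option Int) :=
  PySem.Dict.ofList (islands.map (fun e => (e.1, (e.2.1, e.2.2.1, e.2.2.2))))
def valid_alt (islands : List (Int × Int × Int × Option Int)) (i : Int) (j : Int) : Bool :=
  if i ≥ j then false
  else
    let d := pvDictB islands
    match d.get? i with
    | none => false  -- KeyError in Python; outside Pre_valid
    | some (xi, yi, _) =>
      match d.get? j with
      | none => false  -- KeyError in Python; outside Pre_valid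
      | some (xj, yj, _) =>
        if !(xi == xj || yi == yj) then false
        else
          let occupied : PySem.Set (Int × Int) :=
            PySem.Set.ofList (d.values.map (fun v => (v.1, v.2.1)))
          if xi == xj then
            (PySem.List.pyRange (min yi yj + 1) (max yi yj) 1).all (fun y => !(occupied.contains (xi, y)))
          else
            (PySem.List.pyRange (min xi xj + 1) (max xi xj) 1).all (fun x => !(occupied.contains (x, yi)))

-- ===== PRECONDITION & SPEC =====
-- Pre_ excludes exactly the inputs where Python raises KeyError: i < j but i or j is not a key.
def Pre_valid (islands : List (Int × Int × Int × Option Int)) (i : Int) (j : Int) : Prop :=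
  j ≤ i ∨ (i ∈ islands.map (·.1) ∧ j ∈ islands.map (·.1))
instance (islands : List (Int × Int × Int × Option Int)) (i : Int) (j : Int) : Decidable (Pre_valid islands i j) := by unfold Pre_valid; infer_instance

def pvWitness_valid : (List (Int × Int × Int × Option Int)) × Int × Int :=
  ([(1, 0, 0, none), (2, 0, 2, some 5), (3, 0, 1, none)], 1, 2)

def Spec_valid (islands : List (Int × Int × Int × Option Int)) (i : Int) (j : Int) (out : Bool) : Prop := out = valid_alt islands i j
instance (islands : List (Int × Int × Int × Option Int)) (i : Int) (j : Int) (out : Bool) : Decidable (Spec_valid islands i j out) := by unfold Spec_valid; infer_instance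

-- ===== CLAIM (what is proved, stated in full; the proofs are below) =====
def Claim_equal_valid : Prop := ∀ (islands : List (Int × Int × Int × Option Int)) (i : Int) (j : Int), Dom_valid islands i j → Pre_valid islands i j → Spec_valid islands i j (valid islands i j)

-- ===== LEMMAS AND PROOFS =====

theorem pvDict_nodup (islands : List (Int × Int × Int × Option Int)) : (pvDictA islands).keys.Nodup :=
  PySem.Dict.nodup_keys_ofList _

theorem pvDictB_eq (islands : List (Int × Int × Int × Option Int)) : pvDictB islands = pvDictA islands := rfl

-- membership in values ↔ some key looks it up, for a dict with Nodup keys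
theorem mem_values_iff {κ ν : Type} [BEq κ] [LawfulBEq κ] (d : PySem.Dict κ ν) (hnd : d.keys.Nodup) (v : ν) :
    v ∈ d.values ↔ ∃ k, d.get? k = some v := by
  constructor
  · intro hv
    simp only [PySem.Dict.values, List.mem_map] at hv
    obtain ⟨⟨k0, v0⟩, hp, hpv⟩ := hv
    cases hpv
    exact ⟨k0, PySem.Dict.get?_of_mem_items d hp hnd⟩
  · rintro ⟨k, hk⟩
    have hkv := PySem.Dict.mem_items_of_get?_eq_some (d := d) hk
    simp only [PySem.Dict.values, List.mem_map]
    exact ⟨(k, v), hkv, rfl⟩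

theorem mem_keys_get? {κ ν : Type} [BEq κ] [LawfulBEq κ] (d : PySem.Dict κ ν) (k : κ) :
    k ∈ d.keys ↔ ∃ v, d.get? k = some v := by
  rw [← PySem.Dict.contains_iff_mem_keys, PySem.Dict.contains_eq_isSome_get?]
  cases h : d.get? k <;> simp

theorem mem_keys_pvDict (islands : List (Int × Int × Int × Option Int)) (k : Int) :
    k ∈ (pvDictA islands).keys ↔ k ∈ islands.map (·.1) := by
  rw [show pvDictA islands = (islands.map (fun e => (e.1, (e.2.1, e.2.2.1, e.2.2.2)))).foldl
        (fun d p => d.insert p.1 p.2) PySem.Dict.empty from rfl]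
  rw [PySem.Dict.keys_foldl_insert_key (islands.map (fun e => (e.1, (e.2.1, e.2.2.1, e.2.2.2)))) (·.1) (fun _ p => p.2) PySem.Dict.empty]
  rw [show (PySem.Dict.empty : PySem.Dict Int (Int × Int × Option Int)).keys = [] from rfl]
  rw [PySem.Set.update_nil_left, PySem.Set.mem_ofList]
  simp

-- the vertical case (xi = xj): A's obstruction scan fires iff some interior point of the segment is occupied
theorem any_obstructs_vert (d : PySem.Dict Int (Int × Int × Option Int)) (hnd : d.keys.Nodup)
    (i j xi yi xj yj : Int) (oi oj : Option Int)
    (hvi : d.get? i = some (xi, yi, oi)) (hvj : d.get? j = some (xj, yj, oj)) (hx : xi = xj) :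
    ((d.keys.filter (fun k => k != i && k != j)).any
        (obstructsA d xi yi (min xi xj) (max xi xj) (min yi yj) (max yi yj))) =
    ((PySem.List.pyRange (min yi yj + 1) (max yi yj) 1).any
        (fun y => (PySem.Set.ofList (d.values.map (fun v => (v.1, v.2.1)))).contains (xi, y))) := by
  apply Bool.coe_iff_coe.mp
  simp only [List.any_eq_true, List.mem_filter, PySem.List.mem_pyRange_one,
    PySem.Set.contains_iff, PySem.Set.mem_ofList, List.mem_map]
  constructor
  · rintro ⟨k, ⟨hk, hkij⟩, hob⟩
    simp only [Bool.and_eq_true, bne_iff_ne] at hkij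
    obtain ⟨v, hkv⟩ := (mem_keys_get? d k).1 hk
    obtain ⟨xk, yk, ok⟩ := v
    simp only [obstructsA, hkv] at hob
    simp only [Bool.or_eq_true, Bool.and_eq_true, beq_iff_eq, decide_eq_true_eq] at hob
    rcases hob with ⟨hxk, h1, h2⟩ | ⟨hyk, h1, h2⟩
    · exact ⟨yk, ⟨by omega, by omega⟩, (xk, yk, ok), (mem_values_iff d hnd _).2 ⟨k, hkv⟩, by simp [hxk]⟩
    · omega
  · rintro ⟨y, ⟨hy1, hy2⟩, v, hv, hpos⟩
    obtain ⟨xk, yk, ok⟩ := v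
    obtain ⟨hx1, hy1'⟩ : xk = xi ∧ yk = y :=
      ⟨congrArg Prod.fst hpos, congrArg (fun p => p.2) hpos⟩
    subst hx1 hy1'
    obtain ⟨k, hkv⟩ := (mem_values_iff d hnd _).1 hv
    have hki : k ≠ i := by
      intro h; subst h; rw [hkv] at hvi
      have : yk = yi := congrArg (fun t => t.2.1) (Option.some.inj hvi)
      omega
    have hkj : k ≠ j := by
      intro h; subst h; rw [hkv] at hvj
      have : yk = yj := congrArg (fun t => t.2.1) (Option.some.inj hvj)
      omega
    refine ⟨k, ⟨(mem_keys_get? d k).2 ⟨_, hkv⟩, by simp [hki, hkj]⟩, ?_⟩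
    simp only [obstructsA, hkv]
    simp only [Bool.or_eq_true, Bool.and_eq_true, beq_iff_eq, decide_eq_true_eq]
    left; exact ⟨by trivial, by omega, by omega⟩

-- the horizontal case (xi ≠ xj, hence yi = yj)
theorem any_obstructs_horiz (d : PySem.Dict Int (Int × Int × Option Int)) (hnd : d.keys.Nodup)
    (i j xi yi xj yj : Int) (oi oj : Option Int)
    (hvi : d.get? i = some (xi, yi, oi)) (hvj : d.get? j = some (xj, yj, oj))
    (_hx : xi ≠ xj) (hy : yi = yj) :
    ((d.keys.filter (fun k => k != i && k != j)).any
        (obstructsA d xi yi (min xi xj) (max xi xj) (min yi yj) (max yi yj))) =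
    ((PySem.List.pyRange (min xi xj + 1) (max xi xj) 1).any
        (fun x => (PySem.Set.ofList (d.values.map (fun v => (v.1, v.2.1)))).contains (x, yi))) := by
  apply Bool.coe_iff_coe.mp
  simp only [List.any_eq_true, List.mem_filter, PySem.List.mem_pyRange_one,
    PySem.Set.contains_iff, PySem.Set.mem_ofList, List.mem_map]
  constructor
  · rintro ⟨k, ⟨hk, hkij⟩, hob⟩
    simp only [Bool.and_eq_true, bne_iff_ne] at hkij
    obtain ⟨v, hkv⟩ := (mem_keys_get? d k).1 hk
    obtain ⟨xk, yk, ok⟩ := v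
    simp only [obstructsA, hkv] at hob
    simp only [Bool.or_eq_true, Bool.and_eq_true, beq_iff_eq, decide_eq_true_eq] at hob
    rcases hob with ⟨hxk, h1, h2⟩ | ⟨hyk, h1, h2⟩
    · omega
    · exact ⟨xk, ⟨by omega, by omega⟩, (xk, yk, ok), (mem_values_iff d hnd _).2 ⟨k, hkv⟩, by simp [hyk]⟩
  · rintro ⟨x, ⟨hx1, hx2⟩, v, hv, hpos⟩
    obtain ⟨xk, yk, ok⟩ := v
    obtain ⟨hx1', hy1'⟩ : xk = x ∧ yk = yi :=
      ⟨congrArg Prod.fst hpos, congrArg (fun p => p.2) hpos⟩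
    subst hx1' hy1'
    obtain ⟨k, hkv⟩ := (mem_values_iff d hnd _).1 hv
    have hki : k ≠ i := by
      intro h; subst h; rw [hkv] at hvi
      have : xk = xi := congrArg (fun t => t.1) (Option.some.inj hvi)
      omega
    have hkj : k ≠ j := by
      intro h; subst h; rw [hkv] at hvj
      have : xk = xj := congrArg (fun t => t.1) (Option.some.inj hvj)
      omega
    refine ⟨k, ⟨(mem_keys_get? d k).2 ⟨_, hkv⟩, by simp [hki, hkj]⟩, ?_⟩
    simp only [obstructsA, hkv]
    simp only [Bool.or_eq_true, Bool.and_eq_true, beq_iff_eq, decide_eq_true_eq]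
    right; exact ⟨by trivial, by omega, by omega⟩

theorem not_any_eq_all_not (l : List Int) (p : Int → Bool) :
    (!(l.any p)) = l.all (fun x => !p x) := by
  apply Bool.coe_iff_coe.mp
  simp [List.all_eq_true]

-- ===== VERDICT (by name: the statement is the Claim_ definition above) =====
theorem valid_spec : Claim_equal_valid := by
  intro islands i j _ hpre
  unfold Spec_valid valid valid_alt
  by_cases hij : i ≥ j
  · simp [hij]
  · simp only [if_neg hij, pvDictB_eq]
    have hnd := pvDict_nodup islands
    have hpre' := hpre.resolve_left (by omega)
    obtain ⟨vi, hvi⟩ := (mem_keys_get? (pvDictA islands) i).1 ((mem_keys_pvDict islands i).2 hpre'.1)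
    obtain ⟨vj, hvj⟩ := (mem_keys_get? (pvDictA islands) j).1 ((mem_keys_pvDict islands j).2 hpre'.2)
    obtain ⟨xi, yi, oi⟩ := vi
    obtain ⟨xj, yj, oj⟩ := vj
    simp only [hvi, hvj]
    by_cases halign : xi = xj ∨ yi = yj
    · have hcond : (!(xi == xj || yi == yj)) = false := by
        rcases halign with h | h <;> simp [h]
      simp only [hcond, Bool.false_eq_true, if_false]
      by_cases hx : xi = xj
      · rw [any_obstructs_vert (pvDictA islands) hnd i j xi yi xj yj oi oj hvi hvj hx,
            not_any_eq_all_not]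
        simp [hx]
      · have hy : yi = yj := halign.resolve_left hx
        rw [any_obstructs_horiz (pvDictA islands) hnd i j xi yi xj yj oi oj hvi hvj hx hy,
            not_any_eq_all_not]
        simp [hx]
    · have hcond : (!(xi == xj || yi == yj)) = true := by
        simp only [not_or] at halign
        simp [halign.1, halign.2]
      simp [hcond]
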